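-- pv_equiv track=rewrite | github.com/Vchitect/Uni-MMMU | eval_ummmu.py | _is_parse_ok
-- ===== SOURCE A (Python) =====
-- from typing import Any, Dict, List, Optional, Tuple, Union
-- from typing import Any, Dict, List, Optional, Tuple, Union
-- from typing import Union, Optional
--
-- def _is_parse_ok(grid: Optional[List[List[str]]], walls: List[List[bool]]) -> bool:
--
--     if grid is None: return False
--
--
--     if len(grid) != len(walls) or (len(grid) > 0 and len(grid[0]) != len(walls[0])):
--         return False
--
--     R, C = len(walls), len(walls[0])
--     cnt_S = cnt_G = cnt_SG = 0
--
--     for r in range(R):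
--         for c in range(C):
--             cell = grid[r][c]
--             if cell == '?': return False
--             if (cell == '#') != walls[r][c]: return False
--             if cell == 'S': cnt_S += 1
--             elif cell == 'G': cnt_G += 1
--             elif cell == 'SG': cnt_SG += 1
--
--     has_valid_sg = (cnt_SG == 1 and cnt_S == 0 and cnt_G == 0) or \
--                    (cnt_SG == 0 and cnt_S == 1 and cnt_G == 1)
--
--     return has_valid_sg
-- ===== SOURCE B (Python) =====
-- from typing import List, Optional
--
-- def _is_parse_ok(grid: Optional[List[List[str]]], walls: List[List[bool]]) -> bool:
--     if grid is None:
--         return False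
--     if len(grid) != len(walls) or (len(grid) > 0 and len(grid[0]) != len(walls[0])):
--         return False
--     for grow, wrow in zip(grid, walls):
--         if '?' in grow or [c == '#' for c in grow] != wrow:
--             return False
--     specials = sorted(c for row in grid for c in row if c in ('S', 'G', 'SG'))
--     return specials == ['SG'] or specials == ['G', 'S']
-- ===== Notes on version B (the rewrite author's own statement) =====
-- stated objective: alternative
-- what changed: A's fused per-cell nested index loop with early returns and three running counters is replaced by a row-level structural check (each grid row's '#'-pattern compared as a whole list against the wall row, plus a '?' membership test) followed by collecting the special symbols with filter+sort and comparing the sorted list against the two legal patterns ['SG'] and ['G','S'], instead of counting.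
-- outside the precondition, e.g. on _is_parse_ok([['?', 'x'], ['a']], [[False, False], [False, False]]): A returns False, B returns False; on _is_parse_ok([['S'], ['G', '#']], [[False], [False, False]]): A returns True, B returns False; on _is_parse_ok([], []): A raises IndexError, B returns False
import Mathlib
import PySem

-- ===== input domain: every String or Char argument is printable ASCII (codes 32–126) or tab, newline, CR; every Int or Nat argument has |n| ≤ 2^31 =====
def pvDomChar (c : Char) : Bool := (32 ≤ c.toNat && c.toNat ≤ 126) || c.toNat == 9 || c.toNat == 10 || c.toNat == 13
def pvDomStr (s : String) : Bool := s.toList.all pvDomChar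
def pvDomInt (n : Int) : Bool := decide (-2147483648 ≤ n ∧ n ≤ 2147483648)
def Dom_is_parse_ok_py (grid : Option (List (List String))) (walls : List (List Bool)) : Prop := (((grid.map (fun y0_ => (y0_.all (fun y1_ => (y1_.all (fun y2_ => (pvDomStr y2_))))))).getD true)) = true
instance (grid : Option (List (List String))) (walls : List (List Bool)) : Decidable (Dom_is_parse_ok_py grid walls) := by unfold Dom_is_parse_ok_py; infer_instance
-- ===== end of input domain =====

-- B replaces A's fused per-cell nested loop with running counters by a row-level check (each grid
-- row's '#'-pattern compared as a whole list against the wall row, plus a '?' membership test)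
-- and a filter+sort of the special symbols compared against the two legal patterns (objective:
-- alternative decomposition; same return value, no side effects).

-- ===== PORT A =====
-- literal transliteration of A: nested for-loops over range(R) × range(C), early return modelled
-- as an Option state (none = 'return False' happened), counters threaded through the fold
def is_parse_ok_py (grid : Option (List (List String))) (walls : List (List Bool)) : Bool :=
  match grid with
  | none => false
  | some g =>
    if g.length ≠ walls.length ∨ (0 < g.length ∧ (PySem.List.pyGetD g 0 []).length ≠ (PySem.List.pyGetD walls 0 []).length) then false
    else
      let R : Int := PySem.List.len walls
      let C : Int := PySem.List.len (PySem.List.pyGetD walls 0 [])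
      let st := (PySem.List.pyRange 0 R).foldl (fun st r =>
        (PySem.List.pyRange 0 C).foldl (fun st c =>
          match st with
          | none => none
          | some (cS, cG, cSG) =>
            let cell := PySem.List.pyGetD (PySem.List.pyGetD g r []) c ""
            if cell == "?" then none
            else if ((cell == "#") != PySem.List.pyGetD (PySem.List.pyGetD walls r []) c false) then none
            else if cell == "S" then some (cS + 1, cG, cSG)
            else if cell == "G" then some (cS, cG + 1, cSG)
            else if cell == "SG" then some (cS, cG, cSG + 1)
            else some (cS, cG, cSG)) st) (some ((0 : Nat), (0 : Nat), (0 : Nat)))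
      match st with
      | none => false
      | some (cS, cG, cSG) => decide ((cSG = 1 ∧ cS = 0 ∧ cG = 0) ∨ (cSG = 0 ∧ cS = 1 ∧ cG = 1))

-- ===== PORT B =====
-- literal transliteration of Source B: same None/shape guards; the for-loop over zip(grid, walls)
-- with early 'return False' becomes one List.any over the zipped rows ('?' membership or the
-- row's '#'-pattern list differing from the wall row); then the special symbols are filtered
-- out of the flattened grid, sorted, and compared against the two legal patterns
def is_parse_ok_py_alt (grid : Option (List (List String))) (walls : List (List Bool)) : Bool :=
  match grid with
  | none => false
  | some g =>
    if g.length ≠ walls.length ∨ (0 < g.length ∧ (PySem.List.pyGetD g 0 []).length ≠ (PySem.List.pyGetD walls 0 []).length) then false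
    else if (g.zip walls).any (fun pr => pr.1.contains "?" || decide (pr.1.map (fun c => c == "#") ≠ pr.2)) then false
    else
      let specials := PySem.List.sorted (g.flatten.filter (fun c => c == "S" || c == "G" || c == "SG")) (fun x => x) false
      decide (specials = ["SG"] ∨ specials = ["G", "S"])

-- ===== PRECONDITION & SPEC =====
-- Pre_ excludes (i) grid = some [] with walls = [] (A raises IndexError at walls[0]) and
-- (ii) ragged grid/walls rows that pass the row-0 shape guard (A may raise IndexError mid-loop,
-- and where it returns early the value depends on its scan order); all rectangular inputs,
-- grid = None, and all shape-guard mismatches are admitted.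
def Pre_is_parse_ok_py (grid : Option (List (List String))) (walls : List (List Bool)) : Prop :=
  ∀ g ∈ grid.toList,
    (g.length ≠ walls.length ∨
     (g ≠ [] ∧ g.headI.length ≠ walls.headI.length) ∨
     (walls ≠ [] ∧ (∀ row ∈ g, row.length = walls.headI.length) ∧
        (∀ row ∈ walls, row.length = walls.headI.length)))
instance (grid : Option (List (List String))) (walls : List (List Bool)) : Decidable (Pre_is_parse_ok_py grid walls) := by unfold Pre_is_parse_ok_py; infer_instance

def pvWitness_is_parse_ok_py : Option (List (List String)) × List (List Bool) :=
  (some [["S", "."], [".", "G"]], [[false, false], [false, false]])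

def Spec_is_parse_ok_py (grid : Option (List (List String))) (walls : List (List Bool)) (out : Bool) : Prop := out = is_parse_ok_py_alt grid walls
instance (grid : Option (List (List String))) (walls : List (List Bool)) (out : Bool) : Decidable (Spec_is_parse_ok_py grid walls out) := by unfold Spec_is_parse_ok_py; infer_instance

-- ===== CLAIM (what is proved, stated in full; the proofs are below) =====
def Claim_equal_is_parse_ok_py : Prop := ∀ (grid : Option (List (List String))) (walls : List (List Bool)), Dom_is_parse_ok_py grid walls → Pre_is_parse_ok_py grid walls → Spec_is_parse_ok_py grid walls (is_parse_ok_py grid walls)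

-- ===== LEMMAS AND PROOFS =====

-- the per-cell transition of A's loop, on a (cell, wall) pair
def pvStep (st : Option (Nat × Nat × Nat)) (p : String × Bool) : Option (Nat × Nat × Nat) :=
  match st with
  | none => none
  | some (cS, cG, cSG) =>
    if p.1 == "?" then none
    else if ((p.1 == "#") != p.2) then none
    else if p.1 == "S" then some (cS + 1, cG, cSG)
    else if p.1 == "G" then some (cS, cG + 1, cSG)
    else if p.1 == "SG" then some (cS, cG, cSG + 1)
    else some (cS, cG, cSG)

theorem pvStep_none (ps : List (String × Bool)) : ps.foldl pvStep none = none := by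
  induction ps with
  | nil => rfl
  | cons p t ih => simpa [pvStep] using ih

-- characterisation of A's loop over a flat list of (cell, wall) pairs
theorem pvStep_foldl (ps : List (String × Bool)) (cS cG cSG : Nat) :
    ps.foldl pvStep (some (cS, cG, cSG)) =
      if ps.any (fun p => p.1 == "?" || ((p.1 == "#") != p.2)) then none
      else some (cS + (ps.map Prod.fst).count "S", cG + (ps.map Prod.fst).count "G",
                 cSG + (ps.map Prod.fst).count "SG") := by
  induction ps generalizing cS cG cSG with
  | nil => simp
  | cons p t ih =>
    obtain ⟨q, w⟩ := p
    by_cases h1 : q = "?"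
    · subst h1
      simp [List.foldl_cons, pvStep, pvStep_none]
    · by_cases h2 : ((q == "#") != w) = true
      · simp [List.foldl_cons, pvStep, h1, h2, pvStep_none]
      · rw [Bool.not_eq_true] at h2
        by_cases hS : q = "S"
        · subst hS
          have hw : w = false := by simpa using h2
          subst hw
          cases hany : t.any (fun p => p.1 == "?" || ((p.1 == "#") != p.2)) <;>
            simp [List.foldl_cons, pvStep, ih, List.count_cons, hany] <;> omega
        · by_cases hG : q = "G"
          · subst hG
            have hw : w = false := by simpa using h2
            subst hw
            cases hany : t.any (fun p => p.1 == "?" || ((p.1 == "#") != p.2)) <;>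
              simp [List.foldl_cons, pvStep, ih, List.count_cons, hany] <;> omega
          · by_cases hSG : q = "SG"
            · subst hSG
              have hw : w = false := by simpa using h2
              subst hw
              cases hany : t.any (fun p => p.1 == "?" || ((p.1 == "#") != p.2)) <;>
                simp [List.foldl_cons, pvStep, ih, List.count_cons, hany] <;> omega
            · cases hany : t.any (fun p => p.1 == "?" || ((p.1 == "#") != p.2)) <;>
                simp [List.foldl_cons, pvStep, ih, List.count_cons, hany, h1, h2, hS, hG, hSG]

-- indexing a zip = pair of the indexings, for an in-range nonnegative index
theorem pvGetD_zip {α β : Type} (as : List α) (bs : List β) (h : as.length = bs.length)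
    (i : Int) (hi0 : 0 ≤ i) (hilt : i < (bs.length : Int)) (da : α) (db : β) :
    PySem.List.pyGetD (as.zip bs) i (da, db) =
      (PySem.List.pyGetD as i da, PySem.List.pyGetD bs i db) := by
  rw [PySem.List.pyGetD_of_nonneg _ _ hi0, PySem.List.pyGetD_of_nonneg _ _ hi0,
      PySem.List.pyGetD_of_nonneg _ _ hi0]
  have hb : i.toNat < bs.length := by omega
  have ha : i.toNat < as.length := by omega
  have hz : i.toNat < (as.zip bs).length := by simp [List.length_zip]; omega
  rw [List.getD_eq_getElem _ _ hz, List.getD_eq_getElem _ _ ha, List.getD_eq_getElem _ _ hb,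
      List.getElem_zip]

-- zip of flattens = flatten of row-wise zips, for rectangular inputs of equal height
theorem pvFlat_zip (W : Nat) : ∀ (g : List (List String)) (w : List (List Bool)),
    g.length = w.length → (∀ row ∈ g, row.length = W) → (∀ row ∈ w, row.length = W) →
    (g.zip w).flatMap (fun pr => pr.1.zip pr.2) = g.flatten.zip w.flatten := by
  intro g
  induction g with
  | nil => intro w hl _ _; simp [List.length_eq_zero_iff.mp hl.symm]
  | cons a g' ih =>
    intro w hl hg hw
    cases w with
    | nil => simp at hl
    | cons b w' =>
      have hab : a.length = b.length := by
        rw [hg a (by simp), hw b (by simp)]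
      simp only [List.zip_cons_cons, List.flatMap_cons, List.flatten_cons]
      rw [List.zip_append hab, ih w' (by simpa using hl) (fun r hr => hg r (by simp [hr]))
        (fun r hr => hw r (by simp [hr]))]

theorem pvFlatten_len {α : Type} (W : Nat) (l : List (List α))
    (h : ∀ row ∈ l, row.length = W) : l.flatten.length = l.length * W := by
  induction l with
  | nil => simp
  | cons a t ih =>
    simp only [List.flatten_cons, List.length_append, List.length_cons]
    rw [h a (by simp), ih (fun r hr => h r (by simp [hr]))]
    ring

theorem pvAny_congr {α : Type} (l : List α) (p q : α → Bool) (h : ∀ x ∈ l, p x = q x) :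
    l.any p = l.any q := by
  induction l with
  | nil => rfl
  | cons a t ih => simp_all [List.any_cons]

-- B's whole-row check = A's per-cell check over the zipped row, for rows of equal length
theorem pvRowEq : ∀ (as : List String) (bs : List Bool), as.length = bs.length →
    (as.contains "?" || decide (as.map (fun c => c == "#") ≠ bs)) =
      (as.zip bs).any (fun p => p.1 == "?" || ((p.1 == "#") != p.2)) := by
  intro as
  induction as with
  | nil =>
    intro bs h
    rw [List.length_eq_zero_iff.mp h.symm]
    rfl
  | cons a as' ih =>
    intro bs h
    cases bs with
    | nil => simp at h
    | cons b bs' =>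
      by_cases ha : a = "?"
      · subst ha; simp
      · by_cases hm : (a == "#") = b
        · simp only [List.zip_cons_cons, List.any_cons, List.map_cons, List.contains_cons,
            ← ih bs' (by simpa using h)]
          simp [ha, hm, List.cons.injEq, Bool.or_assoc, Ne.symm ha]
          rw [beq_eq_false_iff_ne.mpr (Ne.symm ha), beq_eq_false_iff_ne.mpr ha]
        · simp [ha, hm, List.cons.injEq, Ne.symm hm]

-- the two legal sorted special-symbol patterns ↔ A's count condition
theorem pvCountsSorted (cells : List String) :
    (((cells.count "SG" = 1 ∧ cells.count "S" = 0 ∧ cells.count "G" = 0) ∨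
      (cells.count "SG" = 0 ∧ cells.count "S" = 1 ∧ cells.count "G" = 1))) ↔
    (PySem.List.sorted (cells.filter (fun c => c == "S" || c == "G" || c == "SG")) (fun x => x) false = ["SG"] ∨
     PySem.List.sorted (cells.filter (fun c => c == "S" || c == "G" || c == "SG")) (fun x => x) false = ["G", "S"]) := by
  set p : String → Bool := fun c => c == "S" || c == "G" || c == "SG" with hp
  set f := cells.filter p with hf
  have hcS : f.count "S" = cells.count "S" := List.count_filter (by decide)
  have hcG : f.count "G" = cells.count "G" := List.count_filter (by decide)
  have hcSG : f.count "SG" = cells.count "SG" := List.count_filter (by decide)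
  have hmem : ∀ x ∈ f, x = "S" ∨ x = "G" ∨ x = "SG" := by
    intro x hx
    have := List.of_mem_filter hx
    simp only [hp, Bool.or_eq_true, beq_iff_eq] at this
    tauto
  constructor
  · rintro (⟨h1, h2, h3⟩ | ⟨h1, h2, h3⟩)
    · left
      apply PySem.List.sorted_eq_of_perm_of_pairwise_lt f ["SG"] (fun x => x)
      · apply List.Perm.symm
        rw [List.perm_iff_count]
        intro a
        by_cases haS : a = "S"
        · subst haS; simp [hcS, h2]
        · by_cases haG : a = "G"
          · subst haG; simp [hcG, h3]
          · by_cases haSG : a = "SG"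
            · subst haSG; simp [hcSG, h1]
            · have : a ∉ f := fun hin => by rcases hmem a hin with h | h | h <;> simp_all
              simp [List.count_eq_zero.mpr this, List.count_cons, Ne.symm haSG]
      · simp
    · right
      apply PySem.List.sorted_eq_of_perm_of_pairwise_lt f ["G", "S"] (fun x => x)
      · apply List.Perm.symm
        rw [List.perm_iff_count]
        intro a
        by_cases haS : a = "S"
        · subst haS; simp [hcS, h2, List.count_cons]
        · by_cases haG : a = "G"
          · subst haG; simp [hcG, h3, List.count_cons]
          · by_cases haSG : a = "SG"
            · subst haSG; simp [hcSG, h1, List.count_cons]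
            · have : a ∉ f := fun hin => by rcases hmem a hin with h | h | h <;> simp_all
              simp [List.count_eq_zero.mpr this, List.count_cons, Ne.symm haS, Ne.symm haG]
      · simp [String.lt_iff_toList_lt]
        decide
  · have hperm := PySem.List.sorted_perm f (fun x : String => x) false
    rintro (h | h) <;> rw [h] at hperm
    · left
      refine ⟨?_, ?_, ?_⟩ <;> [rw [← hcSG]; rw [← hcS]; rw [← hcG]] <;>
        rw [← hperm.count_eq] <;> simp [List.count_cons]
    · right
      refine ⟨?_, ?_, ?_⟩ <;> [rw [← hcSG]; rw [← hcS]; rw [← hcG]] <;>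
        rw [← hperm.count_eq] <;> simp [List.count_cons]

-- ===== VERDICT (by name: the statement is the Claim_ definition above) =====
theorem is_parse_ok_py_spec : Claim_equal_is_parse_ok_py := by
  intro grid walls _hdom hpre
  unfold Spec_is_parse_ok_py
  cases grid with
  | none => rfl
  | some g =>
    simp only [is_parse_ok_py, is_parse_ok_py_alt]
    by_cases hguard : g.length ≠ walls.length ∨ (0 < g.length ∧ (PySem.List.pyGetD g 0 []).length ≠ (PySem.List.pyGetD walls 0 []).length)
    · simp [hguard]
    · simp only [if_neg hguard]
      push_neg at hguard
      obtain ⟨hlen, hhead⟩ := hguard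
      have hp := hpre g (by simp [Option.toList])
      have hrect : walls ≠ [] ∧ (∀ row ∈ g, row.length = walls.headI.length) ∧
          (∀ row ∈ walls, row.length = walls.headI.length) := by
        rcases hp with h | ⟨hne, hh⟩ | h
        · exact absurd hlen h
        · exfalso
          have hgpos : 0 < g.length := List.length_pos_iff.mpr hne
          have := hhead hgpos
          have hwne : walls ≠ [] := by
            intro hw; rw [hw] at hlen; simp at hlen
            exact hne hlen
          apply hh
          cases g with
          | nil => simp at hgpos
          | cons a t =>
            cases walls with
            | nil => exact absurd rfl hwne
            | cons b t' => simpa [PySem.List.pyGetD_zero] using this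
        · exact h
      obtain ⟨hwne, hg, hw⟩ := hrect
      set W := walls.headI.length with hWdef
      have hwpos : 0 < walls.length := List.length_pos_iff.mpr hwne
      have hC : PySem.List.pyGetD walls 0 [] = walls.headI := by
        cases walls with
        | nil => exact absurd rfl hwne
        | cons b t' => simp [PySem.List.pyGetD_zero]
      simp only [PySem.List.len, hC]
      have hzlen : (g.zip walls).length = walls.length := by
        simp [List.length_zip, hlen]
      -- convert A's outer indexed loop into a fold over (g.zip walls)
      have houter :
          (PySem.List.pyRange 0 (walls.length : Int)).foldl (fun st r =>
            (PySem.List.pyRange 0 (W : Int)).foldl (fun st c =>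
              match st with
              | none => none
              | some (cS, cG, cSG) =>
                let cell := PySem.List.pyGetD (PySem.List.pyGetD g r []) c ""
                if cell == "?" then none
                else if ((cell == "#") != PySem.List.pyGetD (PySem.List.pyGetD walls r []) c false) then none
                else if cell == "S" then some (cS + 1, cG, cSG)
                else if cell == "G" then some (cS, cG + 1, cSG)
                else if cell == "SG" then some (cS, cG, cSG + 1)
                else some (cS, cG, cSG)) st) (some ((0 : Nat), (0 : Nat), (0 : Nat)))
          = (g.zip walls).foldl (fun st pr => (pr.1.zip pr.2).foldl pvStep st)
              (some ((0 : Nat), (0 : Nat), (0 : Nat))) := by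
        rw [PySem.List.foldl_congr_mem _ _
          (fun st r => (fun st pr => (pr.1.zip pr.2).foldl pvStep st) st
            (PySem.List.pyGetD (g.zip walls) r ([], [])))]
        · have := PySem.List.foldl_pyRange_zero_pyGetD' (g.zip walls) ([], [])
            (fun st pr => (pr.1.zip pr.2).foldl pvStep st)
            (some ((0 : Nat), (0 : Nat), (0 : Nat)))
          rw [hzlen] at this
          exact this
        · intro st r hr
          rw [PySem.List.mem_pyRange_one] at hr
          obtain ⟨hr0, hrlt⟩ := hr
          have hrg : r.toNat < g.length := by omega
          have hrw : r.toNat < walls.length := by omega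
          rw [pvGetD_zip g walls hlen r hr0 hrlt [] []]
          have hgrow : PySem.List.pyGetD g r [] = g[r.toNat] := by
            rw [PySem.List.pyGetD_of_nonneg _ _ hr0, List.getD_eq_getElem _ _ hrg]
          have hwrow : PySem.List.pyGetD walls r [] = walls[r.toNat] := by
            rw [PySem.List.pyGetD_of_nonneg _ _ hr0, List.getD_eq_getElem _ _ hrw]
          rw [hgrow, hwrow]
          have hglen : (g[r.toNat]).length = W := hg _ (List.getElem_mem hrg)
          have hwlen : (walls[r.toNat]).length = W := hw _ (List.getElem_mem hrw)
          rw [PySem.List.foldl_congr_mem _ _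
            (fun st c => pvStep st (PySem.List.pyGetD ((g[r.toNat]).zip (walls[r.toNat])) c ("", false)))]
          · have := PySem.List.foldl_pyRange_zero_pyGetD' ((g[r.toNat]).zip (walls[r.toNat]))
              ("", false) pvStep st
            have hzr : ((g[r.toNat]).zip (walls[r.toNat])).length = W := by
              simp [List.length_zip, hglen, hwlen]
            rw [hzr] at this
            exact this
          · intro st2 c hc
            rw [PySem.List.mem_pyRange_one] at hc
            obtain ⟨hc0, hclt⟩ := hc
            rw [pvGetD_zip _ _ (by rw [hglen, hwlen]) c hc0 (by omega) "" false]
            rfl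
      rw [houter, List.foldl_flatMap.symm, pvFlat_zip W g walls hlen hg hw, pvStep_foldl]
      have hmapfst : (g.flatten.zip walls.flatten).map Prod.fst = g.flatten := by
        apply List.map_fst_zip
        rw [pvFlatten_len W g hg, pvFlatten_len W walls hw, hlen]
      rw [hmapfst]
      -- B's row-level check = the flat per-cell check
      have hrow : (g.zip walls).any (fun pr => pr.1.contains "?" || decide (pr.1.map (fun c => c == "#") ≠ pr.2))
          = (g.flatten.zip walls.flatten).any (fun p => p.1 == "?" || ((p.1 == "#") != p.2)) := by
        rw [pvAny_congr _ _ (fun pr => (pr.1.zip pr.2).any (fun p => p.1 == "?" || ((p.1 == "#") != p.2)))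
          (fun pr hpr => by
            obtain ⟨h1, h2⟩ := List.of_mem_zip hpr
            exact pvRowEq pr.1 pr.2 (by rw [hg _ h1, hw _ h2]))]
        rw [← List.any_flatMap, pvFlat_zip W g walls hlen hg hw]
      rw [hrow]
      by_cases hbad : (g.flatten.zip walls.flatten).any (fun p => p.1 == "?" || ((p.1 == "#") != p.2))
      · simp [hbad]
      · simp only [hbad, if_neg, Bool.false_eq_true, not_false_eq_true, if_false]
        simp only [Nat.zero_add]
        exact decide_eq_decide.mpr (pvCountsSorted g.flatten)
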